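-- pv_equiv track=rewrite | github.com/hkgkhanh/15-puzzle-solver | main.py | cancel_moves
-- ===== SOURCE A (Python) =====
-- def cancel_moves(moves):
--     opposite = {"L": "R", "R": "L", "U": "D", "D": "U"}
--     stack = []
--
--     for move in moves:
--         if stack and stack[-1] == opposite.get(move):
--             stack.pop()
--         else:
--             stack.append(move)
--
--     return stack
-- ===== SOURCE B (Python) =====
-- def cancel_moves(moves):
--     opposite = {"L": "R", "R": "L", "U": "D", "D": "U"}
--     result = list(moves)
--     while True:
--         for i in range(len(result) - 1):
--             if result[i] == opposite.get(result[i + 1]):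
--                 del result[i:i + 2]
--                 break
--         else:
--             return result
-- ===== Notes on version B (the rewrite author's own statement) =====
-- stated objective: alternative
-- what changed: Replaces the single left-to-right stack pass with a repeated-scan reducer that removes the first adjacent opposite pair and rescans until no pair remains (cancellation is confluent, so the fully reduced sequence is the same).
import Mathlib
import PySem

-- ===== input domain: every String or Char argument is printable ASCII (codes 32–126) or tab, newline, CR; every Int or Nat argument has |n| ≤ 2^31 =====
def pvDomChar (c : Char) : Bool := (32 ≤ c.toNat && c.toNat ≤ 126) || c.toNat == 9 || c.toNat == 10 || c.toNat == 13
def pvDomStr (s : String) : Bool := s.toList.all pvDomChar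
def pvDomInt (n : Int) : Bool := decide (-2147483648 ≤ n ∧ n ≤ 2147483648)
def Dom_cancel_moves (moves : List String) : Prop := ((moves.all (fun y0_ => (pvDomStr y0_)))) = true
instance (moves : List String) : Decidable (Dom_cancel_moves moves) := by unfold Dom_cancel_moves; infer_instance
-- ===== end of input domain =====

-- B replaces A's single stack pass by a repeated-scan reducer (remove the first adjacent
-- opposite pair, rescan until none remains); same fully-reduced result, no mutation of the input.

-- ===== PORT A =====
-- the dict literal {"L":"R","R":"L","U":"D","D":"U"} (shared by both ports)
def opposite : PySem.Dict String String :=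
  PySem.Dict.ofList [("L", "R"), ("R", "L"), ("U", "D"), ("D", "U")]

-- the loop body; the stack is kept head-as-top (Python appends/pops at the end), so
-- stack[-1] is the head and the final return reverses back to Python's order
def stepA (stack : List String) (move : String) : List String :=
  match stack with
  | [] => [move]                       -- 'stack' falsy: append
  | t :: rest =>
      if some t == opposite.get? move  -- stack[-1] == opposite.get(move)
      then rest                        -- stack.pop()
      else move :: t :: rest           -- stack.append(move)

def cancel_moves (moves : List String) : List String :=
  (moves.foldl stepA []).reverse

-- ===== PORT B =====
-- the inner 'for i in range(len(result)-1)' scan: first adjacent pair with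
-- result[i] == opposite.get(result[i+1]) is deleted; none = scan fell through
def findCancel : List String → Option (List String)
  | a :: b :: rest =>
      if some a == opposite.get? b then some rest
      else (findCancel (b :: rest)).map (a :: ·)
  | _ => none

-- removing a pair shortens the list by two (termination of the while loop)
theorem findCancel_length : ∀ {l l' : List String}, findCancel l = some l' → l'.length + 2 = l.length
  | a :: b :: rest, l', h => by
    by_cases hc : (some a == opposite.get? b) = true
    · simp [findCancel, hc] at h; simp [← h]
    · simp [findCancel, hc] at h
      obtain ⟨m, hm, rfl⟩ := h
      have := findCancel_length hm
      simp at this ⊢; omega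

-- the outer 'while True' loop
def reduce (l : List String) : List String :=
  match h : findCancel l with
  | some l' => reduce l'
  | none => l
termination_by l.length
decreasing_by have := findCancel_length h; omega

def cancel_moves_alt (moves : List String) : List String := reduce moves

-- ===== PRECONDITION & SPEC =====
def Spec_cancel_moves (moves : List String) (out : List String) : Prop := out = cancel_moves_alt moves
instance (moves : List String) (out : List String) : Decidable (Spec_cancel_moves moves out) := by unfold Spec_cancel_moves; infer_instance

-- ===== CLAIM (what is proved, stated in full; the proofs are below) =====
def Claim_equal_cancel_moves : Prop := ∀ (moves : List String), Dom_cancel_moves moves → Spec_cancel_moves moves (cancel_moves moves)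

-- ===== LEMMAS AND PROOFS =====

-- the opposite map is an involution on its domain
theorem opp_invol {a b : String} (h : opposite.get? a = some b) : opposite.get? b = some a := by
  by_cases h1 : a = "L"
  · subst h1; rw [show opposite.get? "L" = some "R" from rfl] at h; cases h; decide
  by_cases h2 : a = "R"
  · subst h2; rw [show opposite.get? "R" = some "L" from rfl] at h; cases h; decide
  by_cases h3 : a = "U"
  · subst h3; rw [show opposite.get? "U" = some "D" from rfl] at h; cases h; decide
  by_cases h4 : a = "D"
  · subst h4; rw [show opposite.get? "D" = some "U" from rfl] at h; cases h; decide
  · exfalso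
    simp [opposite, PySem.Dict.get?, PySem.Dict.ofList] at h
    rcases h with ⟨x, hx⟩
    rw [show (PySem.Dict.empty.update [("L", "R"), ("R", "L"), ("U", "D"), ("D", "U")] : PySem.Dict String String).items = [("L", "R"), ("R", "L"), ("U", "D"), ("D", "U")] from rfl] at hx
    simp [List.find?, show ("L" == a) = false by simpa using Ne.symm h1,
      show ("R" == a) = false by simpa using Ne.symm h2,
      show ("U" == a) = false by simpa using Ne.symm h3,
      show ("D" == a) = false by simpa using Ne.symm h4] at hx

-- a stack is "reduced" if no adjacent pair in it could cancel (newer element x over older y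
-- with some y == opposite.get? x); A's stack stays reduced throughout
def red : List String → Bool
  | x :: y :: r => (some y == opposite.get? x) || red (y :: r)
  | _ => false

theorem red_tail {t : String} {r : List String} (h : red (t :: r) = false) : red r = false := by
  match r with
  | [] => simp [red]
  | u :: r' => simp [red] at h; exact h.2

theorem red_step {s : List String} (m : String) (h : red s = false) : red (stepA s m) = false := by
  match s with
  | [] => simp [stepA, red]
  | t :: r =>
    by_cases hc : (some t == opposite.get? m) = true
    · simpa [stepA, hc] using red_tail h
    · simp [stepA, hc, red, h]

-- pushing a then a cancellable b returns a reduced stack unchanged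
theorem step2 {s : List String} {a b : String} (hs : red s = false)
    (hab : opposite.get? b = some a) : stepA (stepA s a) b = s := by
  have hba : opposite.get? a = some b := opp_invol hab
  match s with
  | [] => simp [stepA, hab]
  | t :: r =>
    by_cases hc : (some t == opposite.get? a) = true
    · have ht : t = b := by simpa [hba] using hc
      rw [show stepA (t :: r) a = r by simp [stepA, hc]]
      match r with
      | [] => simp [stepA, ht]
      | u :: r' =>
        have hu : ¬ (some u == opposite.get? b) = true := by
          intro hx
          have hx' : (some u == opposite.get? t) = true := by rw [ht]; exact hx
          simp [red, hx'] at hs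
        simp [stepA, hu, ht]
    · simp [stepA, hc, hab]

-- A's fold is invariant under B's single cancellation step
theorem fold_cancel : ∀ {l l' : List String}, findCancel l = some l' →
    ∀ s : List String, red s = false → l.foldl stepA s = l'.foldl stepA s
  | a :: b :: rest, l', h => by
    intro s hs
    by_cases hc : (some a == opposite.get? b) = true
    · simp [findCancel, hc] at h
      subst h
      have : opposite.get? b = some a := (by simpa using hc : some a = opposite.get? b).symm
      rw [List.foldl_cons, List.foldl_cons, step2 hs this]
    · simp [findCancel, hc] at h
      obtain ⟨m, hm, rfl⟩ := h
      simp only [List.foldl]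
      exact fold_cancel hm (stepA s a) (red_step a hs)

-- the input-side "no adjacent cancellable pair" predicate, and its link to findCancel
def irrL : List String → Bool
  | a :: b :: r => !(some a == opposite.get? b) && irrL (b :: r)
  | _ => true

theorem findCancel_none : ∀ {l : List String}, findCancel l = none → irrL l = true
  | [] , _ => rfl
  | [_], _ => rfl
  | a :: b :: rest, h => by
    by_cases hc : (some a == opposite.get? b) = true
    · simp [findCancel, hc] at h
    · simp [findCancel, hc] at h
      simp [irrL, hc, findCancel_none h]

-- boundary condition between the unprocessed list and the stack top
def bnd : List String → List String → Bool
  | m :: _, x :: _ => !(some x == opposite.get? m)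
  | _, _ => true

-- on an irreducible list A's stack only ever pushes
theorem irr_fold : ∀ (l s : List String), irrL l = true → bnd l s = true →
    l.foldl stepA s = l.reverse ++ s
  | [], s, _, _ => by simp
  | m :: rest, s, hi, hb => by
    have hpush : stepA s m = m :: s := by
      match s with
      | [] => rfl
      | x :: s' => simp [bnd] at hb; simp [stepA, hb]
    have hrest : irrL rest = true := by
      match rest with
      | [] => rfl
      | n :: r' => simp [irrL] at hi; exact hi.2
    have hb' : bnd rest (m :: s) = true := by
      match rest with
      | [] => rfl
      | n :: r' =>
        simp [irrL] at hi
        simp [bnd]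
        simpa using hi.1
    simp only [List.foldl, hpush]
    rw [irr_fold rest (m :: s) hrest hb']
    simp

-- main: A's stack pass computes B's fixed point
theorem key : ∀ l : List String, (l.foldl stepA []).reverse = reduce l := by
  intro l
  induction hn : l.length using Nat.strong_induction_on generalizing l with
  | _ n ih =>
    rw [reduce]
    split
    · next l' h =>
      rw [fold_cancel h [] (by simp [red])]
      exact ih l'.length (by have := findCancel_length h; omega) l' rfl
    · next h =>
      rw [irr_fold l [] (findCancel_none h) (by cases l <;> rfl)]
      simp

-- ===== VERDICT (by name: the statement is the Claim_ definition above) =====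
theorem cancel_moves_spec : Claim_equal_cancel_moves := by
  intro moves _
  unfold Spec_cancel_moves cancel_moves cancel_moves_alt
  exact key moves
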